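-- pv_equiv track=rewrite | github.com/sachishs-15/RTaC | Final_Code-main/src/json_converter.py | modify_args
-- ===== SOURCE A (Python) =====
-- def modify_args(args):
--     """
--     Removes comments (if present somehow)
--     """
--     s = ''
--     cnt = 1
--     for j in args:
--         if j == '(': cnt += 1
--         elif j == ')': cnt -= 1
--         if cnt == 0:
--             break
--         s += j
--     return s
-- ===== SOURCE B (Python) =====
-- def modify_args(args):
--     """
--     Removes comments (if present somehow)
--     """
--     depth = 1
--     for i, ch in enumerate(args):
--         if ch == '(':
--             depth += 1
--         elif ch == ')':
--             depth -= 1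
--         if depth == 0:
--             return args[:i]
--     return args
-- ===== Notes on version B (the rewrite author's own statement) =====
-- stated objective: idiomatic
-- what changed: B finds the cut index where the running depth first reaches 0 and returns a single slice args[:i] (or the whole string), instead of A's character-by-character string concatenation with break.
import Mathlib
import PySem

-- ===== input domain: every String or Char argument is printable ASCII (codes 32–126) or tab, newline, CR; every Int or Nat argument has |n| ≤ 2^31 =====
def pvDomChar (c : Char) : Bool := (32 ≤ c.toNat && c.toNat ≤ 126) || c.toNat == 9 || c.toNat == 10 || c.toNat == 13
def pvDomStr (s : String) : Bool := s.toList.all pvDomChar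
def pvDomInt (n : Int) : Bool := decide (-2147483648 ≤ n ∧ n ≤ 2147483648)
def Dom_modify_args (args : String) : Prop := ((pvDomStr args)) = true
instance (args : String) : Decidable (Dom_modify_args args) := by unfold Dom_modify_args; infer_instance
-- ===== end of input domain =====

-- B replaces A's char-by-char accumulation-with-break by finding the cut index and taking one slice (idiomatic).
-- ===== PORT A =====
-- loop of A: walk the chars keeping cnt, cons each kept char (s += j), stop when cnt hits 0
def goA : List Char → Int → List Char
  | [], _ => []
  | j :: rest, cnt =>
    let cnt := if j = '(' then cnt + 1 else if j = ')' then cnt - 1 else cnt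
    if cnt = 0 then [] else j :: goA rest cnt

def modify_args (args : String) : String := String.ofList (goA args.toList 1)

-- ===== PORT B =====
-- B's loop: find the index i where the running depth first becomes 0
def cutIdx : List Char → Int → Option Nat
  | [], _ => none
  | ch :: rest, d =>
    let d := if ch = '(' then d + 1 else if ch = ')' then d - 1 else d
    if d = 0 then some 0 else (cutIdx rest d).map (· + 1)

def modify_args_alt (args : String) : String :=
  match cutIdx args.toList 1 with
  | some i => String.ofList (args.toList.take i)   -- args[:i]
  | none => args

-- ===== PRECONDITION & SPEC =====
def Spec_modify_args (args : String) (out : String) : Prop := out = modify_args_alt args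
instance (args : String) (out : String) : Decidable (Spec_modify_args args out) := by unfold Spec_modify_args; infer_instance

-- ===== CLAIM (what is proved, stated in full; the proofs are below) =====
def Claim_equal_modify_args : Prop := ∀ (args : String), Dom_modify_args args → Spec_modify_args args (modify_args args)

-- ===== LEMMAS AND PROOFS =====

-- ===== VERDICT (by name: the statement is the Claim_ definition above) =====
theorem goA_eq (l : List Char) : ∀ d : Int,
    goA l d = (match cutIdx l d with
               | some i => l.take i
               | none => l) := by
  induction l with
  | nil => intro d; simp [goA, cutIdx]
  | cons ch rest ih =>
    intro d
    simp only [goA, cutIdx]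
    by_cases h : (if ch = '(' then d + 1 else if ch = ')' then d - 1 else d) = 0
    · simp [h]
    · simp only [if_neg h, ih]
      cases cutIdx rest (if ch = '(' then d + 1 else if ch = ')' then d - 1 else d) <;> simp

theorem modify_args_spec : Claim_equal_modify_args := by
  intro args _
  unfold Spec_modify_args modify_args modify_args_alt
  rw [goA_eq]
  cases h : cutIdx args.toList 1 <;> simp [String.ofList_toList]
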